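-- pv_equiv track=rewrite | github.com/tupisvolodymyr/python-basic-exam | tasks/task1.py | sum_until_negative
-- ===== SOURCE A (Python) =====
-- def sum_until_negative(numbers: list[int]) -> int:
--     total = 0
--     for number in numbers:
--         if number < 0:
--             break
--         total += number
--     return total
--
--
--
--
--
--     """
--     Потрібно порахувати суму чисел у списку ДО першого від’ємного числа.
--
--     ⚠️ Важливо:
--     - Як тільки зустрічається від’ємне число — потрібно зупинитися.
--     - Саме від’ємне число НЕ входить у суму.
--     - Якщо перший елемент від’ємний — результат має бути 0.
--     - Якщо список пустий — результат має бути 0.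
--
--     Підказка:
--     - Вам знадобиться змінна-накопичувач (наприклад total).
--     - Подумайте, де саме потрібно перевіряти умову number < 0.
--     - Чи потрібно використовувати break?
--
--     Приклади:
--         sum_until_negative([1, 2, 3, -1, 4]) -> 6
--         sum_until_negative([5, 10, 15]) -> 30
--         sum_until_negative([-5, 1, 2]) -> 0
--         sum_until_negative([]) -> 0
--     """
-- ===== SOURCE B (Python) =====
-- def sum_until_negative(numbers: list[int]) -> int:
--     idx = next((i for i, x in enumerate(numbers) if x < 0), len(numbers))
--     return sum(numbers[:idx])
-- ===== Notes on version B (the rewrite author's own statement) =====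
-- stated objective: idiomatic
-- what changed: Replaced the accumulate-and-break loop with a two-phase computation: find the index of the first negative element, then sum the slice before it.
import Mathlib
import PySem

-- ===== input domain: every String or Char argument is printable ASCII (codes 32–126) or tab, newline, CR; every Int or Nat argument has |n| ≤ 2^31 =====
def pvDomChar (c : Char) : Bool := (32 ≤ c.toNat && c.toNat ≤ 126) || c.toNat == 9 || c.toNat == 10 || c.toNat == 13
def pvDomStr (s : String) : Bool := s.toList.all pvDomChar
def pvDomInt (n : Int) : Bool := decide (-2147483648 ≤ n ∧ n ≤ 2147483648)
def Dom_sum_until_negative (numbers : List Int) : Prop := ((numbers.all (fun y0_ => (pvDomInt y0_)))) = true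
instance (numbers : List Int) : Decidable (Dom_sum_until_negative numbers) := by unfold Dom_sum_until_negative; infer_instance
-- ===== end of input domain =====

-- B replaces A's accumulate-and-break loop with find-first-negative-index then sum-of-prefix (idiomatic, same cost).


-- ===== PORT A =====
-- accumulate-and-break loop: structural recursion over the list carrying total
def sumUntilNegGo (numbers : List Int) (total : Int) : Int :=
  match numbers with
  | [] => total
  | n :: rest => if n < 0 then total else sumUntilNegGo rest (total + n)

def sum_until_negative (numbers : List Int) : Int := sumUntilNegGo numbers 0

-- ===== PORT B =====
-- B: find the index of the first negative (length if none), then sum the prefix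
def sum_until_negative_alt (numbers : List Int) : Int :=
  let idx := numbers.findIdx (fun x => x < 0)
  (numbers.take idx).sum

-- ===== PRECONDITION & SPEC =====
def Spec_sum_until_negative (numbers : List Int) (out : Int) : Prop := out = sum_until_negative_alt numbers
instance (numbers : List Int) (out : Int) : Decidable (Spec_sum_until_negative numbers out) := by unfold Spec_sum_until_negative; infer_instance

-- ===== CLAIM (what is proved, stated in full; the proofs are below) =====
def Claim_equal_sum_until_negative : Prop := ∀ (numbers : List Int), Dom_sum_until_negative numbers → Spec_sum_until_negative numbers (sum_until_negative numbers)

-- ===== LEMMAS AND PROOFS =====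

-- ===== VERDICT (by name: the statement is the Claim_ definition above) =====
theorem sumUntilNegGo_eq (numbers : List Int) (t : Int) :
    sumUntilNegGo numbers t = t + (numbers.take (numbers.findIdx (fun x => x < 0))).sum := by
  induction numbers generalizing t with
  | nil => simp [sumUntilNegGo]
  | cons n rest ih =>
    by_cases h : n < 0
    · simp [sumUntilNegGo, h, List.findIdx_cons]
    · simp only [sumUntilNegGo, h, if_false, List.findIdx_cons]
      rw [ih]
      simp [List.take_succ_cons]
      ring

theorem sum_until_negative_spec : Claim_equal_sum_until_negative := by
  intro numbers _
  unfold Spec_sum_until_negative sum_until_negative sum_until_negative_alt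
  simpa using sumUntilNegGo_eq numbers 0
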